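-- pv_equiv track=rewrite | github.com/ekmixon/network-engine | filter_plugins/network_engine.py | _gen_ranges
-- ===== SOURCE A (Python) =====
-- def _gen_ranges(vlan):
--     s = e = None
--     for i in sorted(vlan):
--         if s is None:
--             s = e = i
--         elif i in [e, e + 1]:
--             e = i
--         else:
--             yield (s, e)
--             s = e = i
--     if s is not None:
--         yield (s, e)
-- ===== SOURCE B (Python) =====
-- def _gen_ranges(vlan):
--     vals = set(vlan)
--     starts = sorted(v for v in vals if v - 1 not in vals)
--     ends = sorted(v for v in vals if v + 1 not in vals)
--     yield from zip(starts, ends)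
-- ===== Notes on version B (the rewrite author's own statement) =====
-- stated objective: alternative
-- what changed: B computes range boundaries globally on the value set — a value is a range start iff v-1 is absent and a range end iff v+1 is absent — and zips the sorted starts with the sorted ends, instead of A's stateful start/end sweep over the sorted list.
import Mathlib
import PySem

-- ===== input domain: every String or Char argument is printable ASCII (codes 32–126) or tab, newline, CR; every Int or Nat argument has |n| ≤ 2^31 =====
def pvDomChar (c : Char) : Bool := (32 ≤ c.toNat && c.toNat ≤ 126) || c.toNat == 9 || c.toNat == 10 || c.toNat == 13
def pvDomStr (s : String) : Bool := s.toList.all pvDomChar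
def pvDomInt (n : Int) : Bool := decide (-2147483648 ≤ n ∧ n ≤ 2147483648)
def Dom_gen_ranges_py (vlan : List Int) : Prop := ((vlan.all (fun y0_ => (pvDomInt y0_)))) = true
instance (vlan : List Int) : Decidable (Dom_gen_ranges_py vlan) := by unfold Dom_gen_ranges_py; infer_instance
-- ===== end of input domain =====

-- B replaces A's stateful start/end sweep over sorted(vlan) by a global boundary characterisation
-- on the value set (start iff v-1 absent, end iff v+1 absent), zipping sorted starts with sorted ends.

-- ===== PORT A =====
-- loop body of A's 'for i in sorted(vlan)': state = (ranges yielded so far, current (s, e) or None)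
def pvStepA (st : List (Int × Int) × Option (Int × Int)) (i : Int) :
    List (Int × Int) × Option (Int × Int) :=
  match st.2 with
  | none => (st.1, some (i, i))
  | some (s, e) => if i = e ∨ i = e + 1 then (st.1, some (s, i))
      else (st.1 ++ [(s, e)], some (i, i))

-- the final 'if s is not None: yield (s, e)'
def pvFinishA (r : List (Int × Int) × Option (Int × Int)) : List (Int × Int) :=
  match r.2 with
  | none => r.1
  | some (s, e) => r.1 ++ [(s, e)]

def gen_ranges_py (vlan : List Int) : List (Int × Int) :=
  pvFinishA ((PySem.List.sorted vlan (fun x => x) false).foldl pvStepA ([], none))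

-- ===== PORT B =====
def gen_ranges_py_alt (vlan : List Int) : List (Int × Int) :=
  let vals : PySem.Set Int := PySem.Set.ofList vlan
  let starts := PySem.List.sorted
    (vals.filter (fun v => !(PySem.Set.contains vals (v - 1)))) (fun x => x) false
  let ends := PySem.List.sorted
    (vals.filter (fun v => !(PySem.Set.contains vals (v + 1)))) (fun x => x) false
  starts.zip ends

-- ===== PRECONDITION & SPEC =====
def Spec_gen_ranges_py (vlan : List Int) (out : List (Int × Int)) : Prop := out = gen_ranges_py_alt vlan
instance (vlan : List Int) (out : List (Int × Int)) : Decidable (Spec_gen_ranges_py vlan out) := by unfold Spec_gen_ranges_py; infer_instance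

-- ===== CLAIM (what is proved, stated in full; the proofs are below) =====
def Claim_equal_gen_ranges_py : Prop := ∀ (vlan : List Int), Dom_gen_ranges_py vlan → Spec_gen_ranges_py vlan (gen_ranges_py vlan)

-- ===== LEMMAS AND PROOFS =====

-- removing adjacent duplicates
def pvDedupAdj : List Int → List Int
  | [] => []
  | [a] => [a]
  | a :: b :: t => if a = b then pvDedupAdj (b :: t) else a :: pvDedupAdj (b :: t)

-- A's loop body is idempotent on a repeated element
lemma pvStepA_idem (st : List (Int × Int) × Option (Int × Int)) (i : Int) :
    pvStepA (pvStepA st i) i = pvStepA st i := by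
  rcases st with ⟨acc, st⟩
  rcases st with _ | ⟨s, e⟩ <;> simp [pvStepA]
  split_ifs <;> simp

lemma foldl_pvDedupAdj (L : List Int) :
    ∀ st, (pvDedupAdj L).foldl pvStepA st = L.foldl pvStepA st := by
  induction L using pvDedupAdj.induct with
  | case1 => intro st; rfl
  | case2 a => intro st; rfl
  | case3 b t ih =>
      intro st
      simp only [pvDedupAdj, if_true, List.foldl_cons]
      rw [ih, pvStepA_idem, List.foldl_cons]
  | case4 a b t hab ih =>
      intro st
      simp only [pvDedupAdj, if_neg hab, List.foldl_cons]
      rw [ih, List.foldl_cons]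

lemma mem_pvDedupAdj (L : List Int) : ∀ x, x ∈ pvDedupAdj L ↔ x ∈ L := by
  induction L using pvDedupAdj.induct with
  | case1 => simp [pvDedupAdj]
  | case2 a => simp [pvDedupAdj]
  | case3 b t ih => intro x; simp [pvDedupAdj, ih x]
  | case4 a b t hab ih => intro x; simp [pvDedupAdj, if_neg hab, ih x]

lemma pairwise_pvDedupAdj (L : List Int) (h : L.Pairwise (· ≤ ·)) :
    (pvDedupAdj L).Pairwise (· < ·) := by
  induction L using pvDedupAdj.induct with
  | case1 => simp [pvDedupAdj]
  | case2 a => simp [pvDedupAdj]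
  | case3 b t ih =>
      simpa [pvDedupAdj] using ih (List.pairwise_cons.1 h).2
  | case4 a b t hab ih =>
      simp only [pvDedupAdj, if_neg hab]
      obtain ⟨ha, hbt⟩ := List.pairwise_cons.1 h
      refine List.Pairwise.cons ?_ (ih hbt)
      intro x hx
      have hx' : x ∈ b :: t := (mem_pvDedupAdj _ x).1 hx
      have hab' : a ≤ b := ha b (by simp)
      rcases List.mem_cons.1 hx' with rfl | hx'
      · omega
      · have h1 : b ≤ x := (List.pairwise_cons.1 hbt).1 x hx'
        omega

-- the rest of A's loop once a current range (s, e) exists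
def pvRuns (s e : Int) : List Int → List (Int × Int)
  | [] => [(s, e)]
  | i :: t => if i = e ∨ i = e + 1 then pvRuns s i t else (s, e) :: pvRuns i i t

lemma finish_foldl_some (V : List Int) :
    ∀ acc s e, pvFinishA (V.foldl pvStepA (acc, some (s, e))) = acc ++ pvRuns s e V := by
  induction V with
  | nil => intro acc s e; rfl
  | cons i t ih =>
      intro acc s e
      by_cases h : i = e ∨ i = e + 1
      · simp only [List.foldl_cons, pvStepA, if_pos h, pvRuns, ih]
      · simp only [List.foldl_cons, pvStepA, if_neg h, pvRuns, ih, List.append_assoc,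
          List.singleton_append]

-- key lemma: on a strictly increasing tail, A's runs are the zip of starts with ends
lemma pvRuns_eq_zip (V : List Int) (hV : V.Pairwise (· < ·)) :
    ∀ s e, (∀ x ∈ V, e < x) →
      pvRuns s e V =
        (s :: V.filter (fun v => decide ((v - 1) ∉ e :: V))).zip
          ((e :: V).filter (fun v => decide ((v + 1) ∉ e :: V))) := by
  induction V with
  | nil =>
      intro s e _
      simp [pvRuns]
  | cons i t ih =>
      intro s e he
      have hei : e < i := he i (by simp)
      have hit : ∀ x ∈ t, i < x := (List.pairwise_cons.1 hV).1
      have ht : t.Pairwise (· < ·) := (List.pairwise_cons.1 hV).2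
      by_cases h : i = e ∨ i = e + 1
      · have hie : i = e + 1 := by omega
        subst hie
        simp only [pvRuns, or_true, if_true]
        rw [ih ht s (e + 1) hit]
        have hstart : ((e + 1) :: t).filter (fun v => decide ((v - 1) ∉ e :: (e + 1) :: t)) =
            t.filter (fun v => decide ((v - 1) ∉ (e + 1) :: t)) := by
          rw [List.filter_cons_of_neg]
          · refine List.filter_congr ?_
            intro v hv
            have hvt : e + 1 < v := hit v hv
            have hne : ¬ (v - 1 = e) := by omega
            simp [List.mem_cons, not_or, hne]
          · simp only [decide_eq_true_eq, not_not, List.mem_cons]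
            left
            omega
        have hend : ((e :: (e + 1) :: t).filter (fun v => decide ((v + 1) ∉ e :: (e + 1) :: t))) =
            ((e + 1) :: t).filter (fun v => decide ((v + 1) ∉ (e + 1) :: t)) := by
          rw [List.filter_cons_of_neg]
          · refine List.filter_congr ?_
            intro v hv
            have hvt : e + 1 ≤ v := by
              rcases List.mem_cons.1 hv with rfl | hv
              · omega
              · have := hit v hv; omega
            have hne : ¬ (v + 1 = e) := by omega
            simp [List.mem_cons, not_or, hne]
          · simp
        rw [hstart, hend]
      · have hie : e + 1 < i := by omega
        simp only [pvRuns, if_neg h]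
        rw [ih ht i i hit]
        have hstart : (i :: t).filter (fun v => decide ((v - 1) ∉ e :: i :: t)) =
            i :: t.filter (fun v => decide ((v - 1) ∉ i :: t)) := by
          rw [List.filter_cons_of_pos]
          · congr 1
            refine List.filter_congr ?_
            intro v hv
            have hvt : i < v := hit v hv
            have hne : ¬ (v - 1 = e) := by omega
            simp [List.mem_cons, not_or, hne]
          · simp only [decide_eq_true_eq, List.mem_cons, not_or]
            refine ⟨by omega, by omega, ?_⟩
            intro hmem
            have := hit _ hmem
            omega
        have hend : ((e :: i :: t).filter (fun v => decide ((v + 1) ∉ e :: i :: t))) =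
            e :: (i :: t).filter (fun v => decide ((v + 1) ∉ i :: t)) := by
          rw [List.filter_cons_of_pos]
          · congr 1
            refine List.filter_congr ?_
            intro v hv
            have hvt : i ≤ v := by
              rcases List.mem_cons.1 hv with rfl | hv
              · omega
              · have := hit v hv; omega
            have hne : ¬ (v + 1 = e) := by omega
            simp [List.mem_cons, not_or, hne]
          · simp only [decide_eq_true_eq, List.mem_cons, not_or]
            refine ⟨by omega, by omega, ?_⟩
            intro hmem
            have := hit _ hmem
            omega
        rw [hstart, hend]
        rfl

-- the two sorted lists of A and B line up: sorted(set(vlan)) is the adjacent-dedup of sorted(vlan)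
lemma dedupAdj_sorted_eq (vlan : List Int) :
    PySem.List.sorted (PySem.Set.ofList vlan) (fun x => x) false =
      pvDedupAdj (PySem.List.sorted vlan (fun x => x) false) := by
  apply PySem.List.sorted_eq_of_perm_of_pairwise_lt
  · rw [List.perm_ext_iff_of_nodup]
    · intro a
      rw [mem_pvDedupAdj, PySem.List.mem_sorted, PySem.Set.mem_ofList]
    · exact (pairwise_pvDedupAdj _ (PySem.List.sorted_pairwise _ _)).nodup
    · exact PySem.Set.nodup_ofList _
  · exact pairwise_pvDedupAdj _ (PySem.List.sorted_pairwise _ _)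

-- B's sorted-filter of the set is the filter of the sorted set
lemma sorted_filter_set (vlan : List Int) (p : Int → Bool) :
    PySem.List.sorted ((PySem.Set.ofList vlan).filter p) (fun x => x) false =
      (PySem.List.sorted (PySem.Set.ofList vlan) (fun x => x) false).filter p := by
  apply PySem.List.sorted_eq_of_perm_of_pairwise_lt
  · exact (PySem.List.sorted_perm _ _ _).filter p
  · exact (PySem.List.sorted_ofList_pairwise_lt vlan).filter p

-- assembled: A's loop over a strictly increasing list is the zip of boundary filters
lemma pv_fold_eq_zip (V : List Int) (hV : V.Pairwise (· < ·)) :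
    pvFinishA (V.foldl pvStepA ([], none)) =
      (V.filter (fun v => decide ((v - 1) ∉ V))).zip
        (V.filter (fun v => decide ((v + 1) ∉ V))) := by
  cases V with
  | nil => rfl
  | cons i t =>
      have hit : ∀ x ∈ t, i < x := (List.pairwise_cons.1 hV).1
      have ht : t.Pairwise (· < ·) := (List.pairwise_cons.1 hV).2
      have hstep : pvStepA ([], none) i = ([], some (i, i)) := rfl
      have h1 : pvFinishA ((i :: t).foldl pvStepA ([], none)) = pvRuns i i t := by
        rw [List.foldl_cons, hstep, finish_foldl_some]
        simp
      rw [h1, pvRuns_eq_zip t ht i i hit]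
      congr 1
      rw [List.filter_cons_of_pos]
      simp only [decide_eq_true_eq, List.mem_cons, not_or]
      refine ⟨by omega, fun hmem => ?_⟩
      have := hit _ hmem
      omega

lemma pv_main (vlan : List Int) : gen_ranges_py vlan = gen_ranges_py_alt vlan := by
  have hmemV : ∀ x : Int,
      x ∈ PySem.List.sorted (PySem.Set.ofList vlan) (fun x => x) false ↔
        x ∈ PySem.Set.ofList vlan := fun x => PySem.List.mem_sorted _ _ _ _
  have hA : gen_ranges_py vlan =
      pvFinishA ((PySem.List.sorted (PySem.Set.ofList vlan) (fun x => x) false).foldl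
        pvStepA ([], none)) := by
    unfold gen_ranges_py
    rw [dedupAdj_sorted_eq, foldl_pvDedupAdj]
  have hB : gen_ranges_py_alt vlan =
      ((PySem.List.sorted (PySem.Set.ofList vlan) (fun x => x) false).filter
        (fun v => decide ((v - 1) ∉ PySem.List.sorted (PySem.Set.ofList vlan) (fun x => x) false))).zip
      ((PySem.List.sorted (PySem.Set.ofList vlan) (fun x => x) false).filter
        (fun v => decide ((v + 1) ∉ PySem.List.sorted (PySem.Set.ofList vlan) (fun x => x) false))) := by
    show (PySem.List.sorted
        ((PySem.Set.ofList vlan).filter (fun v => !(PySem.Set.contains (PySem.Set.ofList vlan) (v - 1))))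
        (fun x => x) false).zip
      (PySem.List.sorted
        ((PySem.Set.ofList vlan).filter (fun v => !(PySem.Set.contains (PySem.Set.ofList vlan) (v + 1))))
        (fun x => x) false) = _
    rw [sorted_filter_set, sorted_filter_set]
    congr 1
    · refine List.filter_congr ?_
      intro v _
      cases hc : PySem.Set.contains (PySem.Set.ofList vlan) (v - 1) <;>
        simp_all
    · refine List.filter_congr ?_
      intro v _
      cases hc : PySem.Set.contains (PySem.Set.ofList vlan) (v + 1) <;>
        simp_all
  rw [hA, hB]
  exact pv_fold_eq_zip _ (PySem.List.sorted_ofList_pairwise_lt vlan)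

-- ===== VERDICT (by name: the statement is the Claim_ definition above) =====
theorem gen_ranges_py_spec : Claim_equal_gen_ranges_py := by
  intro vlan _
  exact pv_main vlan
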